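-- pv_equiv track=rewrite | github.com/amogchandrashekar/Leetcode | Medium/Sequence Reconstruction.py | sequenceReconstruction
-- ===== SOURCE A (Python) =====
-- from collections import defaultdict, Counter
-- import heapq
--
-- def sequenceReconstruction(org, seqs):
--     # write your code here
--     in_node = Counter()
--     adj_list = defaultdict(list)
--
--     for seq in seqs:
--         for ind in range(len(seq) - 1):
--             if seq[ind + 1] not in adj_list[seq[ind]]:
--                 adj_list[seq[ind]].append(seq[ind + 1])
--                 in_node[seq[ind + 1]] += 1
--                 in_node[seq[ind]] += 0
--         if seq:
--             adj_list[seq[-1]].extend([])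
--             in_node[seq[-1]] += 0
--
--     seen = set()
--     heap = list()
--     order = list()
--
--     for node, in_nodes in in_node.items():
--         heapq.heappush(heap, [in_nodes, node])
--
--     while heap:
--         in_nodes, node = heapq.heappop(heap)
--
--         if node in seen:
--             continue
--
--         order.append(node)
--         seen.add(node)
--
--         if in_nodes != 0:
--             return False
--
--         if heap and heap[0][0] == 0:
--             # checking for no contender
--             return False
--
--         for adj_node in adj_list[node]:
--             in_node[adj_node] -= 1
--             heapq.heappush(heap, [in_node[adj_node], adj_node])
--
--     return order == org
-- ===== SOURCE B (Python) =====
-- def sequenceReconstruction(org, seqs):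
--     # Simpler re-implementation: build the same dedup'd graph, then repeatedly
--     # scan the remaining nodes for the unique in-degree-0 node (no heap, no
--     # stale entries); False as soon as there is not exactly one candidate.
--     indeg = {}
--     adj = {}
--     for seq in seqs:
--         for a, b in zip(seq, seq[1:]):
--             nexts = adj.setdefault(a, [])
--             if b not in nexts:
--                 nexts.append(b)
--                 indeg[b] = indeg.get(b, 0) + 1
--                 indeg.setdefault(a, 0)
--         if seq:
--             indeg.setdefault(seq[-1], 0)
--     remaining = list(indeg)
--     order = []
--     while remaining:
--         zeros = [x for x in remaining if indeg[x] == 0]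
--         if len(zeros) != 1:
--             return False
--         x = zeros[0]
--         order.append(x)
--         remaining.remove(x)
--         for y in adj.get(x, []):
--             indeg[y] -= 1
--     return order == org
-- ===== Notes on version B (the rewrite author's own statement) =====
-- stated objective: simpler
-- what changed: B replaces A's global heap of (in-degree, node) entries with stale duplicates, a seen-set and a post-pop heap-top probe by a plain loop that rescans the remaining nodes for the unique in-degree-0 node each round (returning False unless exactly one exists) and removes it.
import Mathlib
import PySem

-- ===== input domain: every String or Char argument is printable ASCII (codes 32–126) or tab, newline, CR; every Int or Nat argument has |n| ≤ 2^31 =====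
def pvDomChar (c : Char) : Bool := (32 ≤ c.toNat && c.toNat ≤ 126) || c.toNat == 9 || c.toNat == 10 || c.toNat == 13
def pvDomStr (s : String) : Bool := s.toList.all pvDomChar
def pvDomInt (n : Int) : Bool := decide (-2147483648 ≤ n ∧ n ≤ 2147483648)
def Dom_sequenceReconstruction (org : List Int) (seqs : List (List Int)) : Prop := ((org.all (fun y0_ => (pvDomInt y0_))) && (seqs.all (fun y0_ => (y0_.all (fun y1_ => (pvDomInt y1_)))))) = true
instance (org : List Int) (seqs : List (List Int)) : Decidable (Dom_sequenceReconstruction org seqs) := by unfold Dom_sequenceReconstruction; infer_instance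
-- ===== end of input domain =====

-- B replaces A's global heap of (in-degree, node) entries (with stale entries and a
-- post-pop top probe) by a plain rescan of the remaining nodes for the unique
-- in-degree-0 node; objective: simpler.

-- ===== PORT A =====
-- heapq entries are the 2-element lists [in_nodes, node], compared lexicographically.
-- heappop returns a minimal entry and heap[0] is a minimal entry, so the heap is
-- ported as a bag with minimum extraction (exact: only minima are ever observed,
-- and equal entries are identical values).
def pvPairLe (u v : Int × Int) : Bool := u.1 < v.1 || (u.1 == v.1 && u.2 ≤ v.2)

def pvHeapMin : List (Int × Int) → Option (Int × Int)
  | [] => none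
  | v :: rest => some (rest.foldl (fun m w => if pvPairLe m w then m else w) v)

-- the two graph-building loops of A (Counter / defaultdict; the defaultdict's
-- key-creating touches of adj_list are dropped: adj_list is only ever READ via
-- getD-style lookups, so its key set is unobservable)
def pvBuildA (seqs : List (List Int)) : PySem.Dict Int Int × PySem.Dict Int (List Int) :=
  seqs.foldl (fun st seq =>
    let st2 := (PySem.List.pyRange 0 (PySem.List.len seq - 1) 1).foldl
      (fun (st : PySem.Dict Int Int × PySem.Dict Int (List Int)) i =>
        let a := PySem.List.pyGetD seq i 0
        let b := PySem.List.pyGetD seq (i + 1) 0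
        if (st.2.getD a []).contains b then st
        else
          ((st.1.modify b 0 (· + 1)).modify a 0 (· + 0),
           st.2.insert a (st.2.getD a [] ++ [b]))) st
    if seq.isEmpty then st2
    else (st2.1.modify (PySem.List.pyGetD seq (-1) 0) 0 (· + 0), st2.2))
    (PySem.Dict.empty, PySem.Dict.empty)

-- the while-heap loop; the fuel only makes the recursion structural: it bounds the
-- number of pops (each iteration pops exactly one entry, and at most
-- |heap| + Σ len(adj[x]) entries are ever pushed)
def pvLoopA (org : List Int) (adj : PySem.Dict Int (List Int)) :
    Nat → PySem.Dict Int Int → List (Int × Int) → PySem.Set Int → List Int → Bool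
  | 0, _, _, _, order => order == org
  | fuel+1, inn, heap, seen, order =>
    match pvHeapMin heap with
    | none => order == org
    | some m =>
      let rest := heap.erase m
      if PySem.Set.contains seen m.2 then pvLoopA org adj fuel inn rest seen order
      else
        let order' := order ++ [m.2]
        let seen' := PySem.Set.add seen m.2
        if m.1 != 0 then false
        else if (match pvHeapMin rest with | some w => w.1 == 0 | none => false) then false
        else
          let st := (adj.getD m.2 []).foldl
            (fun (st : PySem.Dict Int Int × List (Int × Int)) y =>
              let inn' := st.1.modify y 0 (· - 1)
              (inn', st.2 ++ [(inn'.getD y 0, y)])) (inn, rest)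
          pvLoopA org adj fuel st.1 st.2 seen' order'

def sequenceReconstruction (org : List Int) (seqs : List (List Int)) : Bool :=
  let st := pvBuildA seqs
  let heap := st.1.items.foldl (fun h p => h ++ [(p.2, p.1)]) []
  pvLoopA org st.2
    (heap.length + (st.1.keys.map (fun x => (st.2.getD x []).length)).sum + 1)
    st.1 heap [] []

-- ===== PORT B =====
def pvBuildB (seqs : List (List Int)) : PySem.Dict Int Int × PySem.Dict Int (List Int) :=
  seqs.foldl (fun st seq =>
    let st2 := (seq.zip seq.tail).foldl
      (fun (st : PySem.Dict Int Int × PySem.Dict Int (List Int)) p =>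
        let nexts := st.2.getD p.1 []
        let adj := st.2.setdefault p.1 []
        if nexts.contains p.2 then (st.1, adj)
        else
          ((st.1.insert p.2 (st.1.getD p.2 0 + 1)).setdefault p.1 0,
           adj.insert p.1 (nexts ++ [p.2]))) st
    if seq.isEmpty then st2
    else (st2.1.setdefault (PySem.List.pyGetD seq (-1) 0) 0, st2.2))
    (PySem.Dict.empty, PySem.Dict.empty)

-- the rescan loop; every pass removes one node from `remaining`, so
-- fuel = |remaining| makes the recursion structural.  `indeg[y] -= 1` is ported as
-- insert y (getD y 0 - 1): y is always a key (registered when the edge was built).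
def pvLoopB (org : List Int) (adj : PySem.Dict Int (List Int)) :
    Nat → List Int → PySem.Dict Int Int → List Int → Bool
  | 0, _, _, order => order == org
  | fuel+1, remaining, indeg, order =>
    if remaining.isEmpty then order == org
    else
      let zeros := remaining.filter (fun x => indeg.getD x 0 == 0)
      if zeros.length != 1 then false
      else
        let x := zeros.headD 0
        pvLoopB org adj fuel (remaining.erase x)
          ((adj.getD x []).foldl (fun d y => d.insert y (d.getD y 0 - 1)) indeg)
          (order ++ [x])

def sequenceReconstruction_alt (org : List Int) (seqs : List (List Int)) : Bool :=
  let st := pvBuildB seqs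
  pvLoopB org st.2 st.1.keys.length st.1.keys st.1 []

-- ===== PRECONDITION & SPEC =====
def Spec_sequenceReconstruction (org : List Int) (seqs : List (List Int)) (out : Bool) : Prop := out = sequenceReconstruction_alt org seqs
instance (org : List Int) (seqs : List (List Int)) (out : Bool) : Decidable (Spec_sequenceReconstruction org seqs out) := by unfold Spec_sequenceReconstruction; infer_instance

-- ===== CLAIM (what is proved, stated in full; the proofs are below) =====
def Claim_equal_sequenceReconstruction : Prop := ∀ (org : List Int) (seqs : List (List Int)), Dom_sequenceReconstruction org seqs → Spec_sequenceReconstruction org seqs (sequenceReconstruction org seqs)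

-- ===== LEMMAS AND PROOFS =====

-- the Prop form of the lexicographic comparison on heap entries
def pvLeP (u v : Int × Int) : Prop := u.1 < v.1 ∨ (u.1 = v.1 ∧ u.2 ≤ v.2)

theorem pvPairLe_iff (u v : Int × Int) : pvPairLe u v = true ↔ pvLeP u v := by
  simp [pvPairLe, pvLeP]

theorem pvLeP_total (u v : Int × Int) : pvLeP u v ∨ pvLeP v u := by
  unfold pvLeP; omega

theorem pvHeapMin_eq_none_iff (h : List (Int × Int)) : pvHeapMin h = none ↔ h = [] := by
  cases h <;> simp [pvHeapMin]

theorem pvFoldlMin_mem (l : List (Int × Int)) : ∀ v : Int × Int,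
    l.foldl (fun m w => if pvPairLe m w then m else w) v = v ∨
    l.foldl (fun m w => if pvPairLe m w then m else w) v ∈ l := by
  induction l with
  | nil => intro v; simp
  | cons w l ih =>
    intro v
    simp only [List.foldl_cons]
    by_cases hc : pvPairLe v w = true
    · rw [if_pos hc]
      rcases ih v with h | h
      · exact Or.inl h
      · exact Or.inr (List.mem_cons_of_mem _ h)
    · rw [if_neg hc]
      rcases ih w with h | h
      · exact Or.inr (by rw [h]; exact List.mem_cons_self)
      · exact Or.inr (List.mem_cons_of_mem _ h)

theorem pvFoldlMin_le (l : List (Int × Int)) : ∀ v : Int × Int,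
    pvLeP (l.foldl (fun m w => if pvPairLe m w then m else w) v) v ∧
    ∀ w ∈ l, pvLeP (l.foldl (fun m w => if pvPairLe m w then m else w) v) w := by
  induction l with
  | nil => intro v; simp [pvLeP]
  | cons w l ih =>
    intro v
    simp only [List.foldl_cons]
    by_cases hc : pvPairLe v w = true
    · simp only [hc, if_pos]
      rcases ih v with ⟨h1, h2⟩
      refine ⟨h1, ?_⟩
      intro u hu
      rcases List.mem_cons.mp hu with rfl | hu
      · rw [pvPairLe_iff] at hc
        unfold pvLeP at *; omega
      · exact h2 u hu
    · simp only [hc, if_neg, Bool.false_eq_true, not_false_iff]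
      rcases ih w with ⟨h1, h2⟩
      have hwv : pvLeP w v := by
        rcases pvLeP_total v w with h | h
        · rw [← pvPairLe_iff] at h; exact absurd h hc
        · exact h
      refine ⟨?_, ?_⟩
      · unfold pvLeP at *; omega
      · intro u hu
        rcases List.mem_cons.mp hu with rfl | hu
        · exact h1
        · exact h2 u hu

theorem pvHeapMin_mem {h : List (Int × Int)} {m : Int × Int}
    (hm : pvHeapMin h = some m) : m ∈ h := by
  cases h with
  | nil => simp [pvHeapMin] at hm
  | cons v l =>
    simp only [pvHeapMin, Option.some.injEq] at hm
    rcases pvFoldlMin_mem l v with h1 | h1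
    · rw [← hm, h1]; exact List.mem_cons_self
    · rw [← hm]; exact List.mem_cons_of_mem _ h1

theorem pvHeapMin_le {h : List (Int × Int)} {m : Int × Int}
    (hm : pvHeapMin h = some m) : ∀ w ∈ h, pvLeP m w := by
  cases h with
  | nil => simp [pvHeapMin] at hm
  | cons v l =>
    simp only [pvHeapMin, Option.some.injEq] at hm
    rcases pvFoldlMin_le l v with ⟨h1, h2⟩
    intro w hw
    rcases List.mem_cons.mp hw with rfl | hw
    · rw [← hm]; exact h1
    · rw [← hm]; exact h2 w hw

-- countP changes by one when the predicate is flipped to true at a single member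
theorem pvCountP_update {l : List Int} {a : Int} (hnd : l.Nodup) (ha : a ∈ l)
    {p q : Int → Bool} (hpa : p a = false) (hqa : q a = true)
    (hagree : ∀ x, x ≠ a → p x = q x) : l.countP q = l.countP p + 1 := by
  induction l with
  | nil => simp at ha
  | cons x t ih =>
    rcases List.nodup_cons.mp hnd with ⟨hx, ht⟩
    rcases List.mem_cons.mp ha with rfl | ha'
    · have : t.countP q = t.countP p := by
        apply List.countP_congr
        intro z hz
        rw [hagree z (fun h => hx (h ▸ hz))]
      simp [hpa, hqa, this]
    · have hxa : x ≠ a := fun h => hx (h ▸ ha')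
      have := ih ht ha'
      simp [List.countP_cons, hagree x hxa, this]
      omega

theorem pvCountP_erase {l : List Int} {a : Int} (ha : a ∈ l) (p : Int → Bool) :
    l.countP p = (if p a then 1 else 0) + (l.erase a).countP p := by
  have := (List.perm_cons_erase ha).countP_eq p
  rw [this, List.countP_cons]
  omega

theorem pvSum_erase {l : List Int} {a : Int} (ha : a ∈ l) (f : Int → Nat) :
    (l.map f).sum = f a + ((l.erase a).map f).sum := by
  have := List.Perm.sum_eq ((List.perm_cons_erase ha).map f)
  simpa using this

theorem pvFilter_eq_singleton {l : List Int} {a : Int} (hnd : l.Nodup) (ha : a ∈ l)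
    {p : Int → Bool} (hpa : p a = true) (hothers : ∀ z ∈ l, p z = true → z = a) :
    l.filter p = [a] := by
  induction l with
  | nil => simp at ha
  | cons x t ih =>
    rcases List.nodup_cons.mp hnd with ⟨hx, ht⟩
    rcases List.mem_cons.mp ha with rfl | ha'
    · rw [List.filter_cons_of_pos hpa]
      have : t.filter p = [] := by
        rw [List.filter_eq_nil_iff]
        intro z hz hpz
        exact hx ((hothers z (List.mem_cons_of_mem _ hz) hpz) ▸ hz)
      rw [this]
    · have hxa : x ≠ a := fun h => hx (h ▸ ha')
      have hpx : p x = false := by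
        by_contra h
        exact hxa (hothers x List.mem_cons_self (Bool.of_not_eq_false h))
      rw [List.filter_cons_of_neg (by simp [hpx])]
      exact ih ht ha' (fun z hz => hothers z (List.mem_cons_of_mem _ hz))

theorem pvTwo_le_length {l : List Int} {a b : Int} (ha : a ∈ l) (hb : b ∈ l)
    (hne : a ≠ b) : 2 ≤ l.length := by
  match l with
  | [] => simp at ha
  | [c] =>
    simp only [List.mem_singleton] at ha hb
    exact absurd (ha.trans hb.symm) hne
  | _ :: _ :: _ => simp [List.length_cons]

-- A's inner index loop over range(len(seq)-1) is the loop over consecutive pairs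
theorem pvZipPairs (s : List Int) :
    (List.range (s.length - 1)).map (fun k => (s.getD k 0, s.getD (k + 1) 0)) = s.zip s.tail := by
  induction s with
  | nil => simp
  | cons x t ih =>
    cases t with
    | nil => simp
    | cons y u =>
      have hlen : (x :: y :: u).length - 1 = u.length + 1 := by simp
      rw [hlen, List.range_succ_eq_map, List.map_cons, List.map_map]
      have h2 : ((fun k => ((x :: y :: u).getD k 0, (x :: y :: u).getD (k + 1) 0)) ∘ Nat.succ)
          = fun k => ((y :: u).getD k 0, (y :: u).getD (k + 1) 0) := by
        funext k
        simp [Function.comp]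
      rw [h2]
      have h3 : (y :: u).length - 1 = u.length := by simp
      rw [h3] at ih
      rw [ih]
      rfl

theorem pvRangeFold_eq_zipFold {σ : Type} (s : List Int) (F : σ → Int → Int → σ) (init : σ) :
    (PySem.List.pyRange 0 (PySem.List.len s - 1) 1).foldl
      (fun st i => F st (PySem.List.pyGetD s i 0) (PySem.List.pyGetD s (i + 1) 0)) init
    = (s.zip s.tail).foldl (fun st p => F st p.1 p.2) init := by
  have hrange : PySem.List.pyRange 0 (PySem.List.len s - 1) 1
      = List.map (fun k : Nat => (k : Int)) (List.range (s.length - 1)) := by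
    rw [PySem.List.pyRange_one]
    simp only [PySem.List.len_eq, sub_zero]
    rw [show ((s.length : Int) - 1).toNat = s.length - 1 by omega]
    exact List.map_congr_left (fun k _ => zero_add _)
  rw [hrange, List.foldl_map, ← pvZipPairs s, List.foldl_map]
  congr 1
  funext st k
  rw [show ((k : Int) + 1) = ((k + 1 : Nat) : Int) by push_cast; ring]
  rw [PySem.List.pyGetD_natCast, PySem.List.pyGetD_natCast]

-- the decrement-and-push loop of A, over a duplicate-free adjacency list
theorem pvFoldA_update (L : List Int) : ∀ (d : PySem.Dict Int Int) (acc : List (Int × Int)),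
    L.Nodup →
    (L.foldl (fun st y =>
        let inn' := st.1.modify y 0 (· - 1)
        (inn', st.2 ++ [(inn'.getD y 0, y)])) (d, acc)).2
      = acc ++ L.map (fun y => (d.getD y 0 - 1, y)) ∧
    ∀ z, (L.foldl (fun st y =>
        let inn' := st.1.modify y 0 (· - 1)
        (inn', st.2 ++ [(inn'.getD y 0, y)])) (d, acc)).1.getD z 0
      = d.getD z 0 - (if z ∈ L then 1 else 0) := by
  induction L with
  | nil => intro d acc _; simp
  | cons y t ih =>
    intro d acc hnd
    rcases List.nodup_cons.mp hnd with ⟨hy, ht⟩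
    simp only [List.foldl_cons]
    set d' := d.modify y 0 (· - 1) with hd'
    have hdy : d'.getD y 0 = d.getD y 0 - 1 := by
      rw [hd', PySem.Dict.getD_modify]; simp
    have hdz : ∀ z, z ≠ y → d'.getD z 0 = d.getD z 0 := by
      intro z hz; rw [hd', PySem.Dict.getD_modify, if_neg hz]
    rcases ih d' (acc ++ [(d'.getD y 0, y)]) ht with ⟨h2, h1⟩
    constructor
    · rw [h2, hdy, List.append_assoc, List.singleton_append, List.map_cons]
      congr 2
      apply List.map_congr_left
      intro z hz
      rw [hdz z (fun h => hy (h ▸ hz))]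
    · intro z
      rw [h1 z]
      by_cases hzy : z = y
      · subst hzy
        have : z ∉ t := hy
        simp [this, hdy]
      · rw [hdz z hzy]
        by_cases hzt : z ∈ t <;> simp [hzt, hzy, List.mem_cons]

-- the decrement loop of B
theorem pvFoldB_update (L : List Int) : ∀ (d : PySem.Dict Int Int),
    L.Nodup →
    ∀ z, (L.foldl (fun d y => d.insert y (d.getD y 0 - 1)) d).getD z 0
      = d.getD z 0 - (if z ∈ L then 1 else 0) := by
  induction L with
  | nil => intro d _ z; simp
  | cons y t ih =>
    intro d hnd z
    rcases List.nodup_cons.mp hnd with ⟨hy, ht⟩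
    simp only [List.foldl_cons]
    set d' := d.insert y (d.getD y 0 - 1) with hd'
    have hdy : d'.getD y 0 = d.getD y 0 - 1 := by
      rw [hd', PySem.Dict.getD_insert]; simp
    have hdz : ∀ w, w ≠ y → d'.getD w 0 = d.getD w 0 := by
      intro w hw; rw [hd', PySem.Dict.getD_insert, if_neg hw]
    rw [ih d' ht z]
    by_cases hzy : z = y
    · subst hzy
      have : z ∉ t := hy
      simp [this, hdy]
    · rw [hdz z hzy]
      by_cases hzt : z ∈ t <;> simp [hzt, hzy, List.mem_cons]

-- getD through setdefault is unchanged (Int- and List-valued instances)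
theorem pvGetD_setdefault0 (d : PySem.Dict Int Int) (k y : Int) :
    (d.setdefault k 0).getD y 0 = d.getD y 0 := by
  by_cases hy : y = k
  · subst hy; rw [PySem.Dict.getD_setdefault_self]
  · rw [PySem.Dict.getD_eq_get?_getD, PySem.Dict.get?_setdefault_of_ne d 0 hy,
        ← PySem.Dict.getD_eq_get?_getD]

theorem pvGetDL_setdefault (d : PySem.Dict Int (List Int)) (k x : Int) :
    (d.setdefault k []).getD x [] = d.getD x [] := by
  by_cases hx : x = k
  · subst hx; rw [PySem.Dict.getD_setdefault_self]
  · rw [PySem.Dict.getD_eq_get?_getD, PySem.Dict.get?_setdefault_of_ne d [] hx,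
        ← PySem.Dict.getD_eq_get?_getD]

-- relation between the two build states, with the structural facts the loops need
def pvBInv (iA : PySem.Dict Int Int) (aA : PySem.Dict Int (List Int))
    (iB : PySem.Dict Int Int) (aB : PySem.Dict Int (List Int)) : Prop :=
  iA.keys = iB.keys ∧
  (∀ y, iA.getD y 0 = iB.getD y 0) ∧
  (∀ x, aA.getD x [] = aB.getD x []) ∧
  iA.keys.Nodup ∧
  (∀ x, (aA.getD x []).Nodup) ∧
  (∀ x, x ∉ iA.keys → aA.getD x [] = []) ∧
  (∀ x y, y ∈ aA.getD x [] → x ∈ iA.keys ∧ y ∈ iA.keys) ∧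
  (∀ y, iA.getD y 0 = (iA.keys.countP (fun x => (aA.getD x []).contains y) : Int))

theorem pvBInv_dup {iA iB : PySem.Dict Int Int} {aA aB : PySem.Dict Int (List Int)}
    (h : pvBInv iA aA iB aB) (a : Int) : pvBInv iA aA iB (aB.setdefault a []) := by
  obtain ⟨h1, h2, h3, h4, h5, h6, h7, h8⟩ := h
  exact ⟨h1, h2, fun x => (h3 x).trans (pvGetDL_setdefault aB a x).symm, h4, h5, h6, h7, h8⟩

theorem pvBInv_last {iA iB : PySem.Dict Int Int} {aA aB : PySem.Dict Int (List Int)}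
    (h : pvBInv iA aA iB aB) (x : Int) :
    pvBInv (iA.modify x 0 (· + 0)) aA (iB.setdefault x 0) aB := by
  obtain ⟨h1, h2, h3, h4, h5, h6, h7, h8⟩ := h
  have hcA : iA.contains x = decide (x ∈ iA.keys) := PySem.Dict.contains_eq_decide_mem_keys iA x
  have hcB : iB.contains x = decide (x ∈ iA.keys) := by
    rw [PySem.Dict.contains_eq_decide_mem_keys, h1]
  have hKA : (iA.modify x 0 (· + 0)).keys
      = iA.keys ++ (if x ∈ iA.keys then [] else [x]) := by
    rw [PySem.Dict.keys_modify]
    by_cases hx : x ∈ iA.keys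
    · rw [PySem.Dict.keys_insert_of_contains _ _ (by rw [hcA]; simpa using hx)]; simp [hx]
    · rw [PySem.Dict.keys_insert_of_not_contains _ _ (by rw [hcA]; simpa using hx)]; simp [hx]
  have hKB : (iB.setdefault x 0).keys
      = iB.keys ++ (if x ∈ iA.keys then [] else [x]) := by
    rw [PySem.Dict.keys_setdefault]
    by_cases hx : x ∈ iA.keys
    · rw [if_pos (by rw [hcB]; simpa using hx)]; simp [hx]
    · rw [if_neg (by rw [hcB]; simpa using hx)]; simp [hx]
  have hgd : ∀ y, (iA.modify x 0 (· + 0)).getD y 0 = iA.getD y 0 := by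
    intro y; rw [PySem.Dict.getD_modify]; by_cases hy : y = x <;> simp [hy]
  refine ⟨by rw [hKA, hKB, h1], fun y => by rw [hgd y, pvGetD_setdefault0]; exact h2 y,
    h3, ?_, h5, ?_, ?_, ?_⟩
  · rw [hKA]
    by_cases hx : x ∈ iA.keys
    · simpa [hx] using h4
    · rw [if_neg hx, List.nodup_append]
      exact ⟨h4, List.nodup_singleton x, by intro z hz w hw; rw [List.mem_singleton] at hw; subst hw; intro hzx; subst hzx; exact hx hz⟩
  · intro z hz
    rw [hKA] at hz
    exact h6 z (fun hm => hz (List.mem_append.mpr (Or.inl hm)))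
  · intro u y hy
    rcases h7 u y hy with ⟨hu, hyk⟩
    rw [hKA]
    exact ⟨List.mem_append.mpr (Or.inl hu), List.mem_append.mpr (Or.inl hyk)⟩
  · intro y
    rw [hgd y, hKA, List.countP_append, h8 y]
    by_cases hx : x ∈ iA.keys
    · simp [hx]
    · have hgx : aA.getD x [] = [] := h6 x hx
      simp [hx, hgx]

theorem pvBInv_new {iA iB : PySem.Dict Int Int} {aA aB : PySem.Dict Int (List Int)}
    (h : pvBInv iA aA iB aB) (a b : Int) (hb : (aA.getD a []).contains b = false) :
    pvBInv ((iA.modify b 0 (· + 1)).modify a 0 (· + 0))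
           (aA.insert a (aA.getD a [] ++ [b]))
           ((iB.insert b (iB.getD b 0 + 1)).setdefault a 0)
           ((aB.setdefault a []).insert a (aB.getD a [] ++ [b])) := by
  obtain ⟨h1, h2, h3, h4, h5, h6, h7, h8⟩ := h
  have hbmem : b ∉ aA.getD a [] := by simpa using hb
  set e1 : List Int := if b ∈ iA.keys then [] else [b] with he1
  set e2 : List Int := if a = b ∨ a ∈ iA.keys then [] else [a] with he2
  -- key lists
  have hcAb : iA.contains b = decide (b ∈ iA.keys) := PySem.Dict.contains_eq_decide_mem_keys iA b
  have hcAa : iA.contains a = decide (a ∈ iA.keys) := PySem.Dict.contains_eq_decide_mem_keys iA a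
  have hcBb : iB.contains b = decide (b ∈ iA.keys) := by
    rw [PySem.Dict.contains_eq_decide_mem_keys, ← h1]
  have hKA : ((iA.modify b 0 (· + 1)).modify a 0 (· + 0)).keys = (iA.keys ++ e1) ++ e2 := by
    have hK1 : (iA.modify b 0 (· + 1)).keys = iA.keys ++ e1 := by
      rw [PySem.Dict.keys_modify]
      by_cases hbK : b ∈ iA.keys
      · rw [PySem.Dict.keys_insert_of_contains _ _ (by rw [hcAb]; simpa using hbK)]
        simp [he1, hbK]
      · rw [PySem.Dict.keys_insert_of_not_contains _ _ (by rw [hcAb]; simpa using hbK)]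
        simp [he1, hbK]
    rw [PySem.Dict.keys_modify]
    have hc1 : (iA.modify b 0 (· + 1)).contains a = (a == b || iA.contains a) :=
      PySem.Dict.contains_modify iA b a 0 (· + 1)
    by_cases hab : a = b ∨ a ∈ iA.keys
    · have : (iA.modify b 0 (· + 1)).contains a = true := by
        rw [hc1, hcAa]
        rcases hab with hab | hab <;> simp [hab]
      rw [PySem.Dict.keys_insert_of_contains _ _ this, hK1]
      simp [he2, hab]
    · have hf : (iA.modify b 0 (· + 1)).contains a = false := by
        rw [hc1, hcAa]
        rcases not_or.mp hab with ⟨hab1, hab2⟩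
        simp [hab1, hab2]
      rw [PySem.Dict.keys_insert_of_not_contains _ _ hf, hK1]
      simp [he2, hab]
  have hKB : ((iB.insert b (iB.getD b 0 + 1)).setdefault a 0).keys = (iA.keys ++ e1) ++ e2 := by
    have hK1 : (iB.insert b (iB.getD b 0 + 1)).keys = iA.keys ++ e1 := by
      by_cases hbK : b ∈ iA.keys
      · rw [PySem.Dict.keys_insert_of_contains _ _ (by rw [hcBb]; simpa using hbK), ← h1]
        simp [he1, hbK]
      · rw [PySem.Dict.keys_insert_of_not_contains _ _ (by rw [hcBb]; simpa using hbK), ← h1]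
        simp [he1, hbK]
    rw [PySem.Dict.keys_setdefault]
    have hc1 : (iB.insert b (iB.getD b 0 + 1)).contains a = (a == b || iB.contains a) :=
      PySem.Dict.contains_insert iB b a _
    have hcBa : iB.contains a = decide (a ∈ iA.keys) := by
      rw [PySem.Dict.contains_eq_decide_mem_keys, ← h1]
    by_cases hab : a = b ∨ a ∈ iA.keys
    · have : (iB.insert b (iB.getD b 0 + 1)).contains a = true := by
        rw [hc1, hcBa]
        rcases hab with hab | hab <;> simp [hab]
      rw [if_pos this, hK1]
      simp [he2, hab]
    · have : (iB.insert b (iB.getD b 0 + 1)).contains a = true ↔ False := by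
        rw [hc1, hcBa]
        rcases not_or.mp hab with ⟨hab1, hab2⟩
        simp [hab1, hab2]
      rw [if_neg (by simpa using this), hK1]
      simp [he2, hab]
  -- in-degree values
  have hgdA : ∀ y, ((iA.modify b 0 (· + 1)).modify a 0 (· + 0)).getD y 0
      = iA.getD y 0 + (if y = b then 1 else 0) := by
    intro y
    rw [PySem.Dict.getD_modify]
    by_cases hya : y = a
    · subst hya
      rw [if_pos rfl, PySem.Dict.getD_modify]
      by_cases hab : y = b <;> simp [hab]
    · rw [if_neg hya, PySem.Dict.getD_modify]
      by_cases hyb : y = b <;> simp [hyb]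
  have hgdB : ∀ y, ((iB.insert b (iB.getD b 0 + 1)).setdefault a 0).getD y 0
      = iB.getD y 0 + (if y = b then 1 else 0) := by
    intro y
    rw [pvGetD_setdefault0, PySem.Dict.getD_insert]
    by_cases hyb : y = b <;> simp [hyb]
  -- adjacency values
  have hadjA : ∀ x, (aA.insert a (aA.getD a [] ++ [b])).getD x []
      = if x = a then aA.getD a [] ++ [b] else aA.getD x [] := by
    intro x; rw [PySem.Dict.getD_insert]
  have hadjB : ∀ x, ((aB.setdefault a []).insert a (aB.getD a [] ++ [b])).getD x []
      = if x = a then aB.getD a [] ++ [b] else aB.getD x [] := by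
    intro x
    rw [PySem.Dict.getD_insert]
    by_cases hx : x = a
    · simp [hx]
    · rw [if_neg hx, if_neg hx, pvGetDL_setdefault]
  have hanew : a ∈ (iA.keys ++ e1) ++ e2 := by
    by_cases hab : a = b ∨ a ∈ iA.keys
    · rcases hab with hab | hab
      · subst hab
        by_cases hbK : a ∈ iA.keys
        · simp [hbK]
        · simp [he1, hbK]
      · simp [hab]
    · simp [he2, hab]
  have hbnew : b ∈ (iA.keys ++ e1) ++ e2 := by
    by_cases hbK : b ∈ iA.keys
    · simp [hbK]
    · simp [he1, hbK]
  refine ⟨by rw [hKA, hKB], fun y => by rw [hgdA y, hgdB y, h2 y], ?_, ?_, ?_, ?_, ?_, ?_⟩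
  · intro x
    rw [hadjA x, hadjB x]
    by_cases hx : x = a <;> simp [hx, h3 a, h3 x]
  · -- keys nodup
    rw [hKA, List.nodup_append, List.nodup_append]
    refine ⟨⟨h4, ?_, ?_⟩, ?_, ?_⟩
    · by_cases hbK : b ∈ iA.keys <;> simp [he1, hbK]
    · intro z hz w hw
      by_cases hbK : b ∈ iA.keys
      · rw [he1, if_pos hbK] at hw; simp at hw
      · rw [he1, if_neg hbK, List.mem_singleton] at hw
        subst hw
        intro hzb; subst hzb; exact hbK hz
    · by_cases hab : a = b ∨ a ∈ iA.keys <;> simp [he2, hab]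
    · intro z hz w hw
      by_cases hab : a = b ∨ a ∈ iA.keys
      · rw [he2, if_pos hab] at hw; simp at hw
      · rw [he2, if_neg hab, List.mem_singleton] at hw
        subst hw
        rcases not_or.mp hab with ⟨hab1, hab2⟩
        intro hza; subst hza
        rcases List.mem_append.mp hz with hz | hz
        · exact hab2 hz
        · by_cases hbK : b ∈ iA.keys
          · rw [he1, if_pos hbK] at hz; simp at hz
          · rw [he1, if_neg hbK, List.mem_singleton] at hz
            exact hab1 hz
  · -- adjacency lists nodup
    intro x
    rw [hadjA x]
    by_cases hx : x = a
    · rw [if_pos hx, List.nodup_append]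
      exact ⟨h5 a, List.nodup_singleton b, by intro z hz w hw; rw [List.mem_singleton] at hw; subst hw; intro hzb; subst hzb; exact hbmem hz⟩
    · rw [if_neg hx]; exact h5 x
  · -- fresh keys have empty adjacency
    intro x hx
    rw [hKA] at hx
    have hxa : x ≠ a := fun hxa => hx (hxa ▸ hanew)
    have hxK : x ∉ iA.keys := fun hm => hx (by simp [hm])
    rw [hadjA x, if_neg hxa]
    exact h6 x hxK
  · -- edge endpoints are registered
    intro x y hy
    rw [hKA]
    rw [hadjA x] at hy
    by_cases hx : x = a
    · subst hx
      rw [if_pos rfl] at hy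
      rcases List.mem_append.mp hy with hy | hy
      · rcases h7 x y hy with ⟨_, hyk⟩
        exact ⟨hanew, by simp [hyk]⟩
      · simp only [List.mem_singleton] at hy
        exact ⟨hanew, hy ▸ hbnew⟩
    · rw [if_neg hx] at hy
      rcases h7 x y hy with ⟨hxk, hyk⟩
      exact ⟨by simp [hxk], by simp [hyk]⟩
  · -- in-degree counts incoming dedup'd edges
    intro y
    rw [hgdA y, hKA, List.countP_append, List.countP_append]
    have hGa : ∀ x, x ∉ iA.keys → aA.getD x [] = [] := h6
    have c1 : iA.keys.countP (fun x => ((aA.insert a (aA.getD a [] ++ [b])).getD x []).contains y)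
        = iA.keys.countP (fun x => (aA.getD x []).contains y)
          + (if a ∈ iA.keys ∧ y = b then 1 else 0) := by
      by_cases hy : y = b
      · subst hy
        by_cases haK : a ∈ iA.keys
        · rw [if_pos ⟨haK, rfl⟩]
          apply pvCountP_update h4 haK hb
          · rw [hadjA a, if_pos rfl]; simp
          · intro x hx
            rw [hadjA x, if_neg hx]
        · rw [if_neg (fun hc => haK hc.1), Nat.add_zero]
          apply List.countP_congr
          intro x hx
          have hxa : x ≠ a := fun he => haK (he ▸ hx)
          rw [hadjA x, if_neg hxa]
      · rw [if_neg (fun hc => hy hc.2), Nat.add_zero]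
        apply List.countP_congr
        intro x hx
        rw [hadjA x]
        by_cases hxa : x = a
        · rw [if_pos hxa, hxa]
          simp [List.mem_append, hy]
        · rw [if_neg hxa]
    have c2 : e1.countP (fun x => ((aA.insert a (aA.getD a [] ++ [b])).getD x []).contains y)
        = if b ∈ iA.keys then 0 else (if a = b ∧ y = b then 1 else 0) := by
      by_cases hbK : b ∈ iA.keys
      · simp [he1, hbK]
      · rw [he1, if_neg hbK, if_neg hbK]
        simp only [List.countP_cons, List.countP_nil, Nat.zero_add]
        by_cases hab : a = b
        · subst hab
          rw [hadjA a, if_pos rfl, hGa a hbK]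
          by_cases hy : y = a <;> simp [hy]
        · rw [hadjA b, if_neg (fun h => hab (Eq.symm h)), hGa b hbK]
          simp [hab]
    have c3 : e2.countP (fun x => ((aA.insert a (aA.getD a [] ++ [b])).getD x []).contains y)
        = if a = b ∨ a ∈ iA.keys then 0 else (if y = b then 1 else 0) := by
      by_cases hab : a = b ∨ a ∈ iA.keys
      · simp [he2, hab]
      · rw [he2, if_neg hab, if_neg hab]
        simp only [List.countP_cons, List.countP_nil, Nat.zero_add]
        rcases not_or.mp hab with ⟨hab1, hab2⟩
        rw [hadjA a, if_pos rfl, hGa a hab2]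
        by_cases hy : y = b <;> simp [hy]
    rw [c1, c2, c3, h8 y]
    by_cases hy : y = b <;> by_cases haK : a ∈ iA.keys <;> by_cases hbK : b ∈ iA.keys <;>
      by_cases hab : a = b <;>
      simp [hy, haK, hbK, hab]

theorem pvBuild_fold (l : List (Int × Int)) :
    ∀ (stA stB : PySem.Dict Int Int × PySem.Dict Int (List Int)),
    pvBInv stA.1 stA.2 stB.1 stB.2 →
    pvBInv (l.foldl (fun st p =>
        if (st.2.getD p.1 []).contains p.2 then st
        else ((st.1.modify p.2 0 (· + 1)).modify p.1 0 (· + 0),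
              st.2.insert p.1 (st.2.getD p.1 [] ++ [p.2]))) stA).1
      (l.foldl (fun st p =>
        if (st.2.getD p.1 []).contains p.2 then st
        else ((st.1.modify p.2 0 (· + 1)).modify p.1 0 (· + 0),
              st.2.insert p.1 (st.2.getD p.1 [] ++ [p.2]))) stA).2
      (l.foldl (fun st p =>
        let nexts := st.2.getD p.1 []
        let adj := st.2.setdefault p.1 []
        if nexts.contains p.2 then (st.1, adj)
        else ((st.1.insert p.2 (st.1.getD p.2 0 + 1)).setdefault p.1 0,
              adj.insert p.1 (nexts ++ [p.2]))) stB).1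
      (l.foldl (fun st p =>
        let nexts := st.2.getD p.1 []
        let adj := st.2.setdefault p.1 []
        if nexts.contains p.2 then (st.1, adj)
        else ((st.1.insert p.2 (st.1.getD p.2 0 + 1)).setdefault p.1 0,
              adj.insert p.1 (nexts ++ [p.2]))) stB).2 := by
  induction l with
  | nil => intro stA stB h; exact h
  | cons p t ih =>
    intro stA stB h
    simp only [List.foldl_cons]
    apply ih
    have hcond : (stB.2.getD p.1 []).contains p.2 = (stA.2.getD p.1 []).contains p.2 := by
      rw [h.2.2.1 p.1]
    by_cases hc : (stA.2.getD p.1 []).contains p.2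
    · simp only [hcond, hc, if_pos]
      exact pvBInv_dup h p.1
    · simp only [hcond, hc, Bool.false_eq_true, if_false]
      exact pvBInv_new h p.1 p.2 (Bool.of_not_eq_true hc)

theorem pvBInv_empty : pvBInv (PySem.Dict.empty) (PySem.Dict.empty)
    (PySem.Dict.empty) (PySem.Dict.empty) := by
  refine ⟨rfl, fun y => rfl, fun x => rfl, ?_, ?_, ?_, ?_, ?_⟩ <;> simp [PySem.Dict.keys_empty]

theorem pvBuild_rel (seqs : List (List Int)) :
    pvBInv (pvBuildA seqs).1 (pvBuildA seqs).2 (pvBuildB seqs).1 (pvBuildB seqs).2 := by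
  suffices haux : ∀ (stA stB : PySem.Dict Int Int × PySem.Dict Int (List Int)),
      pvBInv stA.1 stA.2 stB.1 stB.2 →
      pvBInv (seqs.foldl (fun st seq =>
          let st2 := (PySem.List.pyRange 0 (PySem.List.len seq - 1) 1).foldl
            (fun (st : PySem.Dict Int Int × PySem.Dict Int (List Int)) i =>
              let a := PySem.List.pyGetD seq i 0
              let b := PySem.List.pyGetD seq (i + 1) 0
              if (st.2.getD a []).contains b then st
              else
                ((st.1.modify b 0 (· + 1)).modify a 0 (· + 0),
                 st.2.insert a (st.2.getD a [] ++ [b]))) st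
          if seq.isEmpty then st2
          else (st2.1.modify (PySem.List.pyGetD seq (-1) 0) 0 (· + 0), st2.2)) stA).1
        (seqs.foldl _ stA).2
        (seqs.foldl (fun st seq =>
          let st2 := (seq.zip seq.tail).foldl
            (fun (st : PySem.Dict Int Int × PySem.Dict Int (List Int)) p =>
              let nexts := st.2.getD p.1 []
              let adj := st.2.setdefault p.1 []
              if nexts.contains p.2 then (st.1, adj)
              else
                ((st.1.insert p.2 (st.1.getD p.2 0 + 1)).setdefault p.1 0,
                 adj.insert p.1 (nexts ++ [p.2]))) st
          if seq.isEmpty then st2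
          else (st2.1.setdefault (PySem.List.pyGetD seq (-1) 0) 0, st2.2)) stB).1
        (seqs.foldl _ stB).2 by
    exact haux (PySem.Dict.empty, PySem.Dict.empty) (PySem.Dict.empty, PySem.Dict.empty)
      pvBInv_empty
  induction seqs with
  | nil => intro stA stB h; exact h
  | cons seq t ih =>
    intro stA stB h
    simp only [List.foldl_cons]
    apply ih
    rw [pvRangeFold_eq_zipFold seq
      (fun st a b =>
        if (st.2.getD a []).contains b then st
        else ((st.1.modify b 0 (· + 1)).modify a 0 (· + 0),
              st.2.insert a (st.2.getD a [] ++ [b]))) stA]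
    have hin := pvBuild_fold (seq.zip seq.tail) stA stB h
    by_cases he : seq.isEmpty
    · simp only [he, if_pos]
      exact hin
    · simp only [he, Bool.false_eq_true, if_false]
      exact pvBInv_last hin (PySem.List.pyGetD seq (-1) 0)

-- the main simulation: A's heap loop equals B's rescan loop
theorem pvContains_false_iff (s : PySem.Set Int) (z : Int) :
    s.contains z = false ↔ z ∉ s := by
  rw [← PySem.Set.contains_iff s z]; cases s.contains z <;> simp

theorem pvSim (org : List Int) (adjA adjB : PySem.Dict Int (List Int))
    (hg : ∀ x, adjA.getD x [] = adjB.getD x [])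
    (hgnd : ∀ x, (adjA.getD x []).Nodup) :
    ∀ fa fb (innA innB : PySem.Dict Int Int) (heap : List (Int × Int))
      (seen : PySem.Set Int) (remaining order : List Int),
    (∀ y, innB.getD y 0 = innA.getD y 0) →
    remaining.Nodup →
    (∀ x ∈ remaining, seen.contains x = false) →
    (∀ x ∈ remaining, (innA.getD x 0, x) ∈ heap) →
    (∀ p ∈ heap, (p.2 ∈ remaining ∧ innA.getD p.2 0 ≤ p.1) ∨
                 (seen.contains p.2 = true ∧ 1 ≤ p.1)) →
    heap.Nodup →
    (∀ y, innA.getD y 0 = (remaining.countP (fun x => (adjA.getD x []).contains y) : Int)) →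
    (∀ x ∈ remaining, ∀ y ∈ adjA.getD x [], y ∈ remaining ∨ seen.contains y = true) →
    (∀ y, seen.contains y = true → ∀ x ∈ remaining, (adjA.getD x []).contains y = false) →
    heap.length + (remaining.map (fun x => (adjA.getD x []).length)).sum ≤ fa →
    remaining.length ≤ fb →
    pvLoopA org adjA fa innA heap seen order = pvLoopB org adjB fb remaining innB order := by
  intro fa
  induction fa with
  | zero =>
    intro fb innA innB heap seen remaining order hfB hnd hseen hin hheap hhnd hcount htar hsa hFA hFB
    have hhe : heap = [] := by
      cases heap with
      | nil => rfl
      | cons v t => simp at hFA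
    subst hhe
    have hre : remaining = [] := by
      cases remaining with
      | nil => rfl
      | cons x t => exact absurd (hin x List.mem_cons_self) (by simp)
    subst hre
    cases fb <;> simp [pvLoopA, pvLoopB]
  | succ n ih =>
    intro fb innA innB heap seen remaining order hfB hnd hseen hin hheap hhnd hcount htar hsa hFA hFB
    have hf0 : ∀ y, 0 ≤ innA.getD y 0 := by
      intro y; rw [hcount y]; exact Int.natCast_nonneg _
    cases hm : pvHeapMin heap with
    | none =>
      have hhe : heap = [] := (pvHeapMin_eq_none_iff heap).mp hm
      subst hhe
      have hre : remaining = [] := by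
        cases remaining with
        | nil => rfl
        | cons x t => exact absurd (hin x List.mem_cons_self) (by simp)
      subst hre
      cases fb <;> simp [pvLoopA, pvLoopB, pvHeapMin]
    | some m =>
      have hmem : m ∈ heap := pvHeapMin_mem hm
      have hle : ∀ w ∈ heap, pvLeP m w := pvHeapMin_le hm
      rcases hheap m hmem with ⟨hmr, hmle⟩ | ⟨hms, hm1⟩
      · -- m.2 is an unseen node of `remaining`; its entry carries the current in-degree
        have hnotseen : seen.contains m.2 = false := hseen m.2 hmr
        have hfm : innA.getD m.2 0 = m.1 := by
          have := hle _ (hin m.2 hmr)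
          unfold pvLeP at this
          simp only at this
          omega
        cases fb with
        | zero =>
          exact absurd hFB (by have := List.length_pos_of_mem hmr; omega)
        | succ fb' =>
        have hie : remaining.isEmpty = false := by
          cases remaining with
          | nil => simp at hmr
          | cons a t => rfl
        have hzB : remaining.filter (fun z => innB.getD z 0 == 0)
            = remaining.filter (fun z => innA.getD z 0 == 0) :=
          List.filter_congr (fun z _ => by rw [hfB z])
        by_cases hc0 : innA.getD m.2 0 = 0
        · by_cases hz2 : ∃ z ∈ remaining, z ≠ m.2 ∧ innA.getD z 0 = 0
          · -- a second ready node: A trips the contender probe, B sees ≥ 2 zeros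
            rcases hz2 with ⟨z, hzr, hzne, hz0⟩
            have hzin : ((0 : Int), z) ∈ heap.erase m := by
              refine (hhnd.mem_erase_iff).mpr ⟨?_, hz0 ▸ hin z hzr⟩
              intro hcon
              exact hzne (congrArg Prod.snd hcon)
            have hcont : (match pvHeapMin (heap.erase m) with
                | some w => w.1 == 0 | none => false) = true := by
              cases hw : pvHeapMin (heap.erase m) with
              | none =>
                rw [pvHeapMin_eq_none_iff] at hw
                rw [hw] at hzin
                simp at hzin
              | some w =>
                have hw1 : pvLeP w (0, z) := pvHeapMin_le hw _ hzin
                have hwm : w ∈ heap.erase m := pvHeapMin_mem hw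
                have hwh : w ∈ heap := List.mem_of_mem_erase hwm
                have hwge : 0 ≤ w.1 := by
                  rcases hheap w hwh with ⟨_, hwle⟩ | ⟨_, hw1'⟩
                  · exact le_trans (hf0 _) hwle
                  · omega
                unfold pvLeP at hw1
                simp only at hw1
                have : w.1 = 0 := by omega
                simp [this]
            have hAz : pvLoopA org adjA (n + 1) innA heap seen order = false := by
              simp only [pvLoopA, hm, hnotseen, Bool.false_eq_true, if_false, hcont, if_pos]
              have : (m.1 != 0) = false := by simp [← hfm, hc0]
              simp [this]
            have hBz : pvLoopB org adjB (fb' + 1) remaining innB order = false := by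
              simp only [pvLoopB, hie, Bool.false_eq_true, if_false]
              have hm2z : m.2 ∈ remaining.filter (fun z => innA.getD z 0 == 0) :=
                List.mem_filter.mpr ⟨hmr, by simp [hc0]⟩
              have hzz : z ∈ remaining.filter (fun z => innA.getD z 0 == 0) :=
                List.mem_filter.mpr ⟨hzr, by simp [hz0]⟩
              have h2 : 2 ≤ (remaining.filter (fun z => innA.getD z 0 == 0)).length :=
                pvTwo_le_length hm2z hzz (fun h => hzne (Eq.symm h))
              have : ((remaining.filter (fun z => innB.getD z 0 == 0)).length != 1) = true := by
                rw [hzB]; simp; omega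
              simp [this]
            rw [hAz, hBz]
          · -- the unique ready node: both sides take it and recurse
            have hz1 : ∀ z ∈ remaining, innA.getD z 0 = 0 → z = m.2 := by
              intro z hz hzz
              by_contra hne
              exact hz2 ⟨z, hz, hne, hzz⟩
            have hzs : remaining.filter (fun z => innA.getD z 0 == 0) = [m.2] :=
              pvFilter_eq_singleton hnd hmr (by simp [hc0])
                (fun z hz hpz => hz1 z hz (by simpa using hpz))
            -- no other zero entry survives in the popped heap
            have hrest0 : ∀ p ∈ heap.erase m, p.1 ≠ 0 := by
              intro p hp
              rcases (hhnd.mem_erase_iff).mp hp with ⟨hpne, hpm⟩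
              rcases hheap p hpm with ⟨hpr, hple⟩ | ⟨_, hp1⟩
              · by_cases hp2 : p.2 = m.2
                · intro hp10
                  apply hpne
                  rw [Prod.ext_iff]
                  constructor
                  · omega
                  · exact hp2
                · have hnz : innA.getD p.2 0 ≠ 0 := fun hcon => hp2 (hz1 p.2 hpr hcon)
                  have := hf0 p.2
                  omega
              · omega
            have hcont : (match pvHeapMin (heap.erase m) with
                | some w => w.1 == 0 | none => false) = false := by
              cases hw : pvHeapMin (heap.erase m) with
              | none => rfl
              | some w =>
                have := hrest0 w (pvHeapMin_mem hw)
                simp [this]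
            -- the adjacency list of the popped node
            have hLsub : ∀ y ∈ adjA.getD m.2 [], y ∈ remaining ∧ y ≠ m.2 := by
              intro y hy
              have hyr : y ∈ remaining := by
                rcases htar m.2 hmr y hy with h | h
                · exact h
                · exact absurd (hsa y h m.2 hmr) (by simpa using hy)
              refine ⟨hyr, ?_⟩
              intro hcon
              rw [hcon] at hy
              have : (remaining.countP (fun x => (adjA.getD x []).contains m.2) : Int) = 0 :=
                (hcount m.2) ▸ hc0
              rw [Int.natCast_eq_zero, List.countP_eq_zero] at this
              exact (this m.2 hmr) (by simpa using hy)
            rcases pvFoldA_update (adjA.getD m.2 []) innA (heap.erase m) (hgnd m.2)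
              with ⟨hA2, hA1⟩
            have hB1 := pvFoldB_update (adjA.getD m.2 []) innB (hgnd m.2)
            -- reduce A one step
            have hAstep : pvLoopA org adjA (n + 1) innA heap seen order
                = pvLoopA org adjA n
                    ((adjA.getD m.2 []).foldl (fun st y =>
                      let inn' := st.1.modify y 0 (· - 1)
                      (inn', st.2 ++ [(inn'.getD y 0, y)])) (innA, heap.erase m)).1
                    ((adjA.getD m.2 []).foldl (fun st y =>
                      let inn' := st.1.modify y 0 (· - 1)
                      (inn', st.2 ++ [(inn'.getD y 0, y)])) (innA, heap.erase m)).2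
                    (PySem.Set.add seen m.2) (order ++ [m.2]) := by
              simp only [pvLoopA, hm, hnotseen, Bool.false_eq_true, if_false, hcont]
              have : (m.1 != 0) = false := by simp [← hfm, hc0]
              simp [this]
            -- reduce B one step
            have hBstep : pvLoopB org adjB (fb' + 1) remaining innB order
                = pvLoopB org adjB fb' (remaining.erase m.2)
                    ((adjA.getD m.2 []).foldl (fun d y => d.insert y (d.getD y 0 - 1)) innB)
                    (order ++ [m.2]) := by
              simp only [pvLoopB, hie, Bool.false_eq_true, if_false, hzB, hzs, hg m.2]
              simp
            rw [hAstep, hBstep]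
            -- re-establish the invariant and recurse
            apply ih fb'
            · intro y
              rw [hB1 y, hA1 y, hfB y]
            · exact hnd.erase m.2
            · intro z hz
              rcases (hnd.mem_erase_iff).mp hz with ⟨hzne, hzr⟩
              rw [pvContains_false_iff]
              rw [PySem.Set.mem_add]
              rintro (hzs' | hzs')
              · exact absurd ((PySem.Set.contains_iff seen z).mpr hzs')
                  (by rw [hseen z hzr]; simp)
              · exact hzne hzs'
            · intro z hz
              rcases (hnd.mem_erase_iff).mp hz with ⟨hzne, hzr⟩
              rw [hA1 z, hA2]
              by_cases hzL : z ∈ adjA.getD m.2 []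
              · simp only [hzL, if_pos]
                refine List.mem_append.mpr (Or.inr ?_)
                exact List.mem_map.mpr ⟨z, hzL, rfl⟩
              · simp only [hzL, if_false]
                refine List.mem_append.mpr (Or.inl ?_)
                refine (hhnd.mem_erase_iff).mpr ⟨?_, by simpa using hin z hzr⟩
                intro hcon
                exact hzne (congrArg Prod.snd hcon)
            · intro p hp
              rw [hA2] at hp
              rcases List.mem_append.mp hp with hp | hp
              · rcases (hhnd.mem_erase_iff).mp hp with ⟨hpne, hpm⟩
                rcases hheap p hpm with ⟨hpr, hple⟩ | ⟨hps, hp1⟩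
                · by_cases hp2 : p.2 = m.2
                  · refine Or.inr ⟨?_, ?_⟩
                    · rw [PySem.Set.contains_iff, PySem.Set.mem_add]
                      exact Or.inr hp2
                    · have hp1ne : p.1 ≠ 0 := by
                        intro hp10
                        apply hpne
                        rw [Prod.ext_iff]
                        exact ⟨by omega, hp2⟩
                      have : innA.getD p.2 0 = 0 := by rw [hp2]; exact hc0
                      omega
                  · refine Or.inl ⟨(hnd.mem_erase_iff).mpr ⟨hp2, hpr⟩, ?_⟩
                    rw [hA1 p.2]
                    by_cases hpl : p.2 ∈ adjA.getD m.2 [] <;> simp [hpl] <;> omega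
                · refine Or.inr ⟨?_, hp1⟩
                  rw [PySem.Set.contains_iff, PySem.Set.mem_add]
                  exact Or.inl ((PySem.Set.contains_iff seen p.2).mp hps)
              · rcases List.mem_map.mp hp with ⟨y, hyL, rfl⟩
                rcases hLsub y hyL with ⟨hyr, hyne⟩
                refine Or.inl ⟨(hnd.mem_erase_iff).mpr ⟨hyne, hyr⟩, ?_⟩
                rw [hA1 y]
                simp [hyL]
            · rw [hA2, List.nodup_append]
              refine ⟨(List.erase_sublist).nodup hhnd, ?_, ?_⟩
              · exact (hgnd m.2).map (fun y1 y2 h => congrArg Prod.snd h)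
              · intro p hp q hq
                rcases List.mem_map.mp hq with ⟨y, hyL, rfl⟩
                intro hcon
                subst hcon
                rcases hheap _ (List.mem_of_mem_erase hp) with ⟨hpr, hple⟩ | ⟨hps, hp1⟩
                · simp only at hple; omega
                · rcases hLsub y hyL with ⟨hyr, _⟩
                  rw [hseen y hyr] at hps
                  exact Bool.false_ne_true hps
            · intro y
              rw [hA1 y, hcount y,
                pvCountP_erase hmr (fun x => (adjA.getD x []).contains y)]
              by_cases hyL : y ∈ adjA.getD m.2 []
              · have : (adjA.getD m.2 []).contains y = true := by simpa using hyL
                simp only [this, if_pos, hyL]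
                push_cast
                ring
              · have : (adjA.getD m.2 []).contains y = false := by
                  rw [← Bool.not_eq_true]; simpa using hyL
                simp only [this, Bool.false_eq_true, if_false, hyL]
                push_cast
                ring
            · intro x hx y hy
              rcases (hnd.mem_erase_iff).mp hx with ⟨hxne, hxr⟩
              rcases htar x hxr y hy with hyr | hys
              · by_cases hy2 : y = m.2
                · refine Or.inr ?_
                  rw [PySem.Set.contains_iff, PySem.Set.mem_add]
                  exact Or.inr hy2
                · exact Or.inl ((hnd.mem_erase_iff).mpr ⟨hy2, hyr⟩)
              · refine Or.inr ?_
                rw [PySem.Set.contains_iff, PySem.Set.mem_add]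
                exact Or.inl ((PySem.Set.contains_iff seen y).mp hys)
            · intro y hy x hx
              rcases (hnd.mem_erase_iff).mp hx with ⟨hxne, hxr⟩
              rw [PySem.Set.contains_iff, PySem.Set.mem_add] at hy
              rcases hy with hy | hy
              · exact hsa y ((PySem.Set.contains_iff seen y).mpr hy) x hxr
              · have : (remaining.countP (fun x => (adjA.getD x []).contains m.2) : Int) = 0 :=
                  (hcount m.2) ▸ hc0
                rw [Int.natCast_eq_zero, List.countP_eq_zero] at this
                rw [hy, ← Bool.not_eq_true]
                exact this x hxr
            · rw [hA2, List.length_append, List.length_map,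
                List.length_erase_of_mem hmem]
              have hsum := pvSum_erase hmr (fun x => (adjA.getD x []).length)
              have hlen := List.length_pos_of_mem hmem
              omega
            · rw [List.length_erase_of_mem hmr]
              omega
        · -- popped with a non-zero in-degree: A fails; B has no ready node at all
          have hAz : pvLoopA org adjA (n + 1) innA heap seen order = false := by
            simp only [pvLoopA, hm, hnotseen, Bool.false_eq_true, if_false]
            have : (m.1 != 0) = true := by simp [← hfm]; omega
            simp [this]
          have hze : remaining.filter (fun z => innA.getD z 0 == 0) = [] := by
            rw [List.filter_eq_nil_iff]
            intro z hz hcon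
            have hz0 : innA.getD z 0 = 0 := by simpa using hcon
            have : pvLeP m (0, z) := hle _ (hz0 ▸ hin z hz)
            unfold pvLeP at this
            simp only at this
            have := hf0 m.2
            omega
          have hBz : pvLoopB org adjB (fb' + 1) remaining innB order = false := by
            simp only [pvLoopB, hie, Bool.false_eq_true, if_false, hzB, hze]
            simp
          rw [hAz, hBz]
      · -- a stale entry of an already-seen node: A skips it, B's state is unchanged
        simp only [pvLoopA, hm, hms, if_pos]
        apply ih fb innA innB (heap.erase m) seen remaining order hfB hnd hseen
        · intro x hx
          refine (hhnd.mem_erase_iff).mpr ⟨?_, hin x hx⟩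
          intro hcon
          have hx2 : x = m.2 := congrArg Prod.snd hcon
          have hfalse : seen.contains m.2 = false := hx2 ▸ hseen x hx
          rw [hms] at hfalse
          exact Bool.noConfusion hfalse
        · intro p hp
          exact hheap p (List.mem_of_mem_erase hp)
        · exact (List.erase_sublist).nodup hhnd
        · exact hcount
        · exact htar
        · exact hsa
        · have := List.length_erase_of_mem hmem
          have := List.length_pos_of_mem hmem
          omega
        · exact hFB

-- ===== VERDICT (by name: the statement is the Claim_ definition above) =====
theorem sequenceReconstruction_spec : Claim_equal_sequenceReconstruction := by
  intro org seqs _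
  unfold Spec_sequenceReconstruction
  obtain ⟨h1, h2, h3, h4, h5, h6, h7, h8⟩ := pvBuild_rel seqs
  show pvLoopA org (pvBuildA seqs).2
      (((pvBuildA seqs).1.items.foldl (fun h p => h ++ [(p.2, p.1)]) []).length
        + ((pvBuildA seqs).1.keys.map
            (fun x => ((pvBuildA seqs).2.getD x []).length)).sum + 1)
      (pvBuildA seqs).1
      ((pvBuildA seqs).1.items.foldl (fun h p => h ++ [(p.2, p.1)]) []) [] []
    = pvLoopB org (pvBuildB seqs).2 (pvBuildB seqs).1.keys.length
      (pvBuildB seqs).1.keys (pvBuildB seqs).1 []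
  have hheap0 : (pvBuildA seqs).1.items.foldl (fun h p => h ++ [(p.2, p.1)]) []
      = (pvBuildA seqs).1.keys.map (fun k => ((pvBuildA seqs).1.getD k 0, k)) := by
    rw [PySem.List.foldl_append_singleton_eq_map, PySem.Dict.items_eq_map_keys _ h4 0]
    simp [List.map_map, Function.comp]
  rw [hheap0]
  apply pvSim org (pvBuildA seqs).2 (pvBuildB seqs).2 h3 h5
  · intro y; exact (h2 y).symm
  · exact h1 ▸ h4
  · intro x hx; rfl
  · intro x hx
    refine List.mem_map.mpr ⟨x, ?_, rfl⟩
    exact h1 ▸ hx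
  · intro p hp
    rcases List.mem_map.mp hp with ⟨k, hk, rfl⟩
    exact Or.inl ⟨h1 ▸ hk, le_refl _⟩
  · refine List.Nodup.map ?_ (h1 ▸ h4)
    intro a b hab
    exact congrArg Prod.snd hab
  · intro y
    rw [h8 y, ← h1]
  · intro x hx y hy
    exact Or.inl (h1 ▸ (h7 x y hy).2)
  · intro y hy
    exact absurd hy (by simp [PySem.Set.contains])
  · rw [List.length_map, ← h1]
    omega
  · exact le_refl _
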